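-- pv_equiv track=rewrite | github.com/ambisinister/stamina | functions.py | prep_dict_for_viz
-- ===== SOURCE A (Python) =====
-- def prep_dict_for_viz(borges):
-- 	ar = []
--
-- 	for rnd in borges:
-- 		ar_rnd = []
-- 		for x in range(0, len(borges[0])):
-- 			if x in rnd:
-- 				ar_rnd.append(rnd[x])
-- 			else:
-- 				ar_rnd.append(0)
-- 		ar.append(ar_rnd)
--
-- 	return ar
-- ===== SOURCE B (Python) =====
-- def prep_dict_for_viz(borges):
-- 	if not borges:
-- 		return []
-- 	width = len(borges[0])
-- 	out = []
-- 	for rnd in borges: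
-- 		row = [0] * width
-- 		for k, v in rnd.items():
-- 			if 0 <= k < width:
-- 				row[k] = v
-- 		out.append(row)
-- 	return out
-- ===== Notes on version B (the rewrite author's own statement) =====
-- stated objective: alternative
-- what changed: B pre-fills each row with zeros and scatters the dict's present key/value pairs into their columns (one pass over the sparse items), instead of scanning every column index and testing membership per column.
import Mathlib
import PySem

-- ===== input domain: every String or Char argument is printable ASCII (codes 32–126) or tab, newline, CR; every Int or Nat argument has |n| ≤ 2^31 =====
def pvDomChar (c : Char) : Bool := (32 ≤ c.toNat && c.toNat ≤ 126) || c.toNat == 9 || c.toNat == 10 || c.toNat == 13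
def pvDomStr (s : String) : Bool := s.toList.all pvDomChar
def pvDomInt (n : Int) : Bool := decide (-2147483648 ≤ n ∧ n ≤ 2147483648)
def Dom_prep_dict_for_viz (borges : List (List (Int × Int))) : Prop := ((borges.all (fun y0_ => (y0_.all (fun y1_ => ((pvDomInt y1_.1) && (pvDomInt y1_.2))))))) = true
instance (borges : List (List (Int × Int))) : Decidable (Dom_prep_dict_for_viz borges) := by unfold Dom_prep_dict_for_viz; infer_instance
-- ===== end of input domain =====

-- B pre-fills each row with zeros and scatters the dict's items into their columns, instead of scanning every column index and testing membership; same return value, no speed claim.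


-- ===== PORT A =====
-- Each Python dict argument arrives as an association list; PySem.Dict.ofList rebuilds the dict
-- (first-occurrence position, last value wins), exactly Python's dict construction.
-- 'borges[0]' is only evaluated inside the loop body, where borges is nonempty, so pyGetD's default is unreachable.
def prep_dict_for_viz (borges : List (List (Int × Int))) : List (List Int) :=
  borges.foldl (fun ar rnd =>
    let d := PySem.Dict.ofList rnd
    let ar_rnd := (PySem.List.pyRange 0 ((PySem.Dict.ofList (PySem.List.pyGetD borges 0 [])).size : Int) 1).foldl
      (fun acc x => if d.contains x then acc ++ [d.getD x 0] else acc ++ [0]) []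
    ar ++ [ar_rnd]) []

-- ===== PORT B =====
def prep_dict_for_viz_alt (borges : List (List (Int × Int))) : List (List Int) :=
  match borges with
  | [] => []
  | first :: _ =>
    let width := (PySem.Dict.ofList first).size
    borges.foldl (fun out rnd =>
      let row := (PySem.Dict.ofList rnd).items.foldl
        (fun row kv => if 0 ≤ kv.1 ∧ kv.1 < (width : Int) then row.set kv.1.toNat kv.2 else row)
        (List.replicate width 0)
      out ++ [row]) []

-- ===== PRECONDITION & SPEC =====
def Spec_prep_dict_for_viz (borges : List (List (Int × Int))) (out : List (List Int)) : Prop := out = prep_dict_for_viz_alt borges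
instance (borges : List (List (Int × Int))) (out : List (List Int)) : Decidable (Spec_prep_dict_for_viz borges out) := by unfold Spec_prep_dict_for_viz; infer_instance

-- ===== CLAIM (what is proved, stated in full; the proofs are below) =====
def Claim_equal_prep_dict_for_viz : Prop := ∀ (borges : List (List (Int × Int))), Dom_prep_dict_for_viz borges → Spec_prep_dict_for_viz borges (prep_dict_for_viz borges)

-- ===== LEMMAS AND PROOFS =====

-- B's scatter loop never changes the row's length.
theorem scatter_length (w : Nat) (l : List (Int × Int)) (r : List Int) :
    (l.foldl (fun row kv => if 0 ≤ kv.1 ∧ kv.1 < (w : Int) then row.set kv.1.toNat kv.2 else row) r).length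
      = r.length := by
  induction l generalizing r with
  | nil => rfl
  | cons kv rest ih =>
    simp only [List.foldl_cons]
    rw [ih]
    by_cases hb : 0 ≤ kv.1 ∧ kv.1 < (w : Int) <;> simp [hb]

-- B's scatter loop, read element-wise: position n holds the first value keyed n in l
-- (keys are nodup, so "first" is "the" value), else the untouched initial cell.
theorem scatter_getElem (w : Nat) (l : List (Int × Int)) (hl : (l.map Prod.fst).Nodup)
    (r : List Int) (hr : r.length = w) (n : Nat) (hn : n < w) :
    (l.foldl (fun row kv => if 0 ≤ kv.1 ∧ kv.1 < (w : Int) then row.set kv.1.toNat kv.2 else row) r)[n]?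
      = match l.find? (fun kv => kv.1 == (n : Int)) with
        | some kv => some kv.2
        | none => r[n]? := by
  induction l generalizing r with
  | nil => simp
  | cons kv rest ih =>
    simp only [List.map_cons, List.nodup_cons] at hl
    simp only [List.foldl_cons, List.find?_cons]
    by_cases hk : kv.1 = (n : Int)
    · have hb : 0 ≤ kv.1 ∧ kv.1 < (w : Int) := by constructor <;> omega
      rw [if_pos hb, ih hl.2 _ (by simp [hr])]
      have hfind : rest.find? (fun p => p.1 == (n : Int)) = none := by
        rw [List.find?_eq_none]
        intro p hp
        simp only [beq_iff_eq]
        intro hpn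
        exact hl.1 (by rw [hk, ← hpn]; exact List.mem_map_of_mem hp)
      rw [hfind]
      simp only [hk, beq_self_eq_true]
      have h2 : ((n : Int)).toNat = n := by omega
      rw [h2, List.getElem?_set_self (by omega)]
    · have hbeq : (kv.1 == (n : Int)) = false := by simp [hk]
      rw [hbeq]
      by_cases hb : 0 ≤ kv.1 ∧ kv.1 < (w : Int)
      · rw [if_pos hb, ih hl.2 _ (by simp [hr])]
        cases hf : rest.find? (fun p => p.1 == (n : Int)) with
        | some p => rfl
        | none =>
          have hne : kv.1.toNat ≠ n := by omega
          rw [List.getElem?_set_ne hne]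
      · rw [if_neg hb, ih hl.2 _ hr]

-- A's inner loop over range(0, w) builds the row as a map over the range.
theorem a_row_eq_map (d : PySem.Dict Int Int) (w : Nat) :
    (PySem.List.pyRange 0 (w : Int) 1).foldl
      (fun acc x => if d.contains x then acc ++ [d.getD x 0] else acc ++ [0]) []
      = (PySem.List.pyRange 0 (w : Int) 1).map (fun x => d.getD x 0) := by
  calc (PySem.List.pyRange 0 (w : Int) 1).foldl
        (fun acc x => if d.contains x then acc ++ [d.getD x 0] else acc ++ [0]) []
      = (PySem.List.pyRange 0 (w : Int) 1).foldl
        (fun acc x => acc ++ [if d.contains x then d.getD x 0 else 0]) [] := by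
        apply PySem.List.foldl_congr_mem
        intro acc x _
        by_cases h : d.contains x <;> simp [h]
    _ = (PySem.List.pyRange 0 (w : Int) 1).map (fun x => if d.contains x then d.getD x 0 else 0) :=
        (PySem.List.foldl_append_singleton_eq_map _ _ []).trans (List.nil_append _)
    _ = (PySem.List.pyRange 0 (w : Int) 1).map (fun x => d.getD x 0) := by
        apply List.map_congr_left
        intro x _
        by_cases hc : d.contains x
        · rw [if_pos hc]
        · rw [if_neg (by simpa using hc), PySem.Dict.getD_of_not_contains d 0 (by simpa using hc)]

-- Per-row equivalence: A's membership scan over the columns equals B's zero-fill + scatter.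
theorem row_eq (rnd : List (Int × Int)) (w : Nat) :
    (PySem.List.pyRange 0 (w : Int) 1).foldl
      (fun acc x => if (PySem.Dict.ofList rnd).contains x then acc ++ [(PySem.Dict.ofList rnd).getD x 0] else acc ++ [0]) []
    = (PySem.Dict.ofList rnd).items.foldl
        (fun row kv => if 0 ≤ kv.1 ∧ kv.1 < (w : Int) then row.set kv.1.toNat kv.2 else row)
        (List.replicate w 0) := by
  set d := PySem.Dict.ofList rnd with hd
  have hnd : d.keys.Nodup := PySem.Dict.nodup_keys_ofList rnd
  have hndi : (d.items.map Prod.fst).Nodup := hnd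
  rw [a_row_eq_map]
  apply List.ext_getElem?
  intro n
  by_cases hn : n < w
  · rw [List.getElem?_map, PySem.List.getElem?_pyRange_one,
        scatter_getElem w d.items hndi _ (by simp) n hn]
    have h1 : ((w : Int) - 0).toNat = w := by omega
    rw [h1, if_pos hn]
    simp only [Option.map_some, zero_add]
    cases hf : d.items.find? (fun kv => kv.1 == (n : Int)) with
    | some kv =>
      have hmem : kv ∈ d.items := List.mem_of_find?_eq_some hf
      have hkey : kv.1 = (n : Int) := by
        have := List.find?_some hf
        simpa using this
      have hmem' : (kv.1, kv.2) ∈ d.items := by simpa using hmem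
      have hg : d.getD kv.1 0 = kv.2 := PySem.Dict.getD_of_mem_items d hmem' hnd 0
      rw [← hkey, hg]
    | none =>
      have hnc : d.contains (n : Int) = false := by
        by_contra hc
        have hc' : d.contains (n : Int) = true := by
          cases h : d.contains (n : Int) with
          | true => rfl
          | false => exact absurd h hc
        have hkmem : (n : Int) ∈ d.keys := (PySem.Dict.contains_iff_mem_keys d (n : Int)).mp hc'
        obtain ⟨p, hp, hpk⟩ := List.mem_map.mp hkmem
        have := List.find?_eq_none.mp hf p hp
        simp [hpk] at this
      rw [PySem.Dict.getD_of_not_contains d 0 hnc, List.getElem?_replicate]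
      simp [hn]
  · rw [List.getElem?_eq_none (by rw [List.length_map, PySem.List.length_pyRange_one]; omega),
        List.getElem?_eq_none (by rw [scatter_length]; simp only [List.length_replicate]; omega)]

-- ===== VERDICT (by name: the statement is the Claim_ definition above) =====
theorem prep_dict_for_viz_spec : Claim_equal_prep_dict_for_viz := by
  intro borges _
  show prep_dict_for_viz borges = prep_dict_for_viz_alt borges
  cases borges with
  | nil => rfl
  | cons first rest =>
    unfold prep_dict_for_viz prep_dict_for_viz_alt
    simp only []
    have hget : PySem.List.pyGetD (first :: rest) 0 [] = first := by
      simp [PySem.List.pyGetD, PySem.List.pyGet?, PySem.List.pyIdx?]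
    rw [hget]
    apply PySem.List.foldl_congr_mem
    intro acc rnd _
    exact congrArg (fun r => acc ++ [r]) (row_eq rnd ((PySem.Dict.ofList first).size))
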